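-- pv_equiv track=rewrite | github.com/definitelynotrussellkirk-bit/binarySKILL | generators/permutations.py | validate_k_permutation
-- ===== SOURCE A (Python) =====
-- from typing import List, Dict, Any
--
-- def validate_k_permutation(perm: List[int], n: int, k: int) -> bool:
--     """
--     Check if a list is a valid k-permutation from [n].
--
--     Args:
--         perm: List of integers
--         n: Universe size
--         k: Expected arrangement size
--
--     Returns:
--         True if perm is a valid k-permutation
--
--     Examples:
--         >>> validate_k_permutation([3, 1, 5], 10, 3)
--         True
--         >>> validate_k_permutation([3, 1, 1], 10, 3)
--         False
--         >>> validate_k_permutation([3, 1], 10, 3)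
--         False
--     """
--     if len(perm) != k:
--         return False
--     if len(set(perm)) != k:
--         return False  # Duplicates
--     if any(x < 0 or x >= n for x in perm):
--         return False  # Out of range
--     return True
-- ===== SOURCE B (Python) =====
-- def validate_k_permutation(perm, n, k):
--     if len(perm) != k:
--         return False
--     s = sorted(perm)
--     for a, b in zip(s, s[1:]):
--         if a == b:
--             return False  # duplicates show up adjacently once sorted
--     return not s or (s[0] >= 0 and s[-1] < n)
-- ===== Notes on version B (the rewrite author's own statement) =====
-- stated objective: alternative
-- what changed: Replaces the set-based duplicate check and the whole-list range scan with a sort-then-adjacent-scan: duplicates are detected as equal neighbours in sorted(perm), and the range check reduces to testing the sorted minimum and maximum.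
import Mathlib
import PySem

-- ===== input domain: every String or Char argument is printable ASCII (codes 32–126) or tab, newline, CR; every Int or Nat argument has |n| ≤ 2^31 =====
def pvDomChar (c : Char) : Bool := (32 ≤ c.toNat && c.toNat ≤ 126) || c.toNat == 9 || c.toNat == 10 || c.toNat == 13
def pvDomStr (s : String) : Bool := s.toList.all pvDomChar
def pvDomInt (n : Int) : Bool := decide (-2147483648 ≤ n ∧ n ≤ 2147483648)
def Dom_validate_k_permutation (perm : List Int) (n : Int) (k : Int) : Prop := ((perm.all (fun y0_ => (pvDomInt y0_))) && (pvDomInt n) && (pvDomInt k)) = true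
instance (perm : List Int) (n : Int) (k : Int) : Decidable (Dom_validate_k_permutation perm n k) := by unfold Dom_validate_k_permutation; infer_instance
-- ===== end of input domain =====

-- B replaces A's set-based duplicate check and whole-list range scan by a sort-then-adjacent-scan
-- (duplicates = equal neighbours in sorted(perm); range = bounds on the sorted min/max): an alternative decomposition, same result.


-- ===== PORT A =====
def validate_k_permutation (perm : List Int) (n : Int) (k : Int) : Bool :=
  if (perm.length : Int) ≠ k then false
  else if ((PySem.Set.ofList perm).length : Int) ≠ k then false  -- duplicates
  else if perm.any (fun x => decide (x < 0) || decide (x ≥ n)) then false  -- out of range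
  else true

-- ===== PORT B =====
def validate_k_permutation_alt (perm : List Int) (n : Int) (k : Int) : Bool :=
  if (perm.length : Int) ≠ k then false
  else
    let s := PySem.List.sorted perm (fun x => x) false
    if (s.zip s.tail).any (fun p => p.1 == p.2) then false  -- adjacent duplicate in sorted copy
    else
      match s with
      | [] => true
      | x :: t => decide (0 ≤ x) && decide ((x :: t).getLast (List.cons_ne_nil x t) < n)

-- ===== PRECONDITION & SPEC =====
def Spec_validate_k_permutation (perm : List Int) (n : Int) (k : Int) (out : Bool) : Prop := out = validate_k_permutation_alt perm n k
instance (perm : List Int) (n : Int) (k : Int) (out : Bool) : Decidable (Spec_validate_k_permutation perm n k out) := by unfold Spec_validate_k_permutation; infer_instance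

-- ===== CLAIM (what is proved, stated in full; the proofs are below) =====
def Claim_equal_validate_k_permutation : Prop := ∀ (perm : List Int) (n : Int) (k : Int), Dom_validate_k_permutation perm n k → Spec_validate_k_permutation perm n k (validate_k_permutation perm n k)

-- ===== LEMMAS AND PROOFS =====

-- folding Set.add onto an accumulator appends a sublist of the processed list
theorem pv_foldl_add_sublist {α : Type} [BEq α] (xs : List α) :
    ∀ acc : List α, ∃ ys, xs.foldl PySem.Set.add acc = acc ++ ys ∧ ys.Sublist xs := by
  induction xs with
  | nil => intro acc; exact ⟨[], by simp⟩
  | cons x xs ih =>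
    intro acc
    simp only [List.foldl_cons]
    by_cases hc : acc.contains x = true
    · obtain ⟨ys, h1, h2⟩ := ih acc
      refine ⟨ys, ?_, h2.cons x⟩
      rw [← h1]
      simp [PySem.Set.add, hc]
    · obtain ⟨ys, h1, h2⟩ := ih (acc ++ [x])
      refine ⟨x :: ys, ?_, h2.cons₂ x⟩
      have : PySem.Set.add acc x = acc ++ [x] := by simp [PySem.Set.add, hc]
      rw [this, h1, List.append_assoc]
      rfl

theorem pv_ofList_sublist {α : Type} [BEq α] (xs : List α) :
    (PySem.Set.ofList xs).Sublist xs := by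
  obtain ⟨ys, h1, h2⟩ := pv_foldl_add_sublist xs []
  rw [PySem.Set.ofList_eq_foldl, h1]
  simpa using h2

theorem pv_ofList_length_eq_iff (xs : List Int) :
    (PySem.Set.ofList xs).length = xs.length ↔ xs.Nodup := by
  constructor
  · intro h
    have heq : PySem.Set.ofList xs = xs := (pv_ofList_sublist xs).eq_of_length h
    rw [← heq]
    exact PySem.Set.nodup_ofList xs
  · intro hnd
    exact ((List.perm_ext_iff_of_nodup (PySem.Set.nodup_ofList xs) hnd).mpr
      (PySem.Set.mem_ofList xs)).length_eq

-- a ≤-sorted list is duplicate-free iff no two adjacent elements are equal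
theorem pv_zip_nodup (s : List Int) :
    s.Pairwise (fun a b => a ≤ b) →
    (((s.zip s.tail).any (fun p => p.1 == p.2) = false) ↔ s.Nodup) := by
  induction s with
  | nil => intro _; simp
  | cons x t ih =>
    intro hpw
    rw [List.pairwise_cons] at hpw
    obtain ⟨hx, hpt⟩ := hpw
    cases t with
    | nil => simp
    | cons y t' =>
      simp only [List.tail_cons] at ih
      simp only [List.tail_cons, List.zip_cons_cons, List.any_cons, Bool.or_eq_false_iff,
        beq_eq_false_iff_ne, List.nodup_cons]
      rw [ih hpt]
      simp only [List.nodup_cons]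
      constructor
      · rintro ⟨hxy, hnd⟩
        refine ⟨fun hmem => ?_, hnd⟩
        rcases List.mem_cons.mp hmem with h | h
        · exact hxy h
        · obtain ⟨hy2, _⟩ := List.pairwise_cons.mp hpt
          exact hxy (le_antisymm (hx y List.mem_cons_self) (hy2 x h))
      · rintro ⟨hnm, hnd⟩
        exact ⟨fun h => hnm (h ▸ List.mem_cons_self), hnd⟩

theorem pv_le_getLast (s : List Int) :
    s.Pairwise (fun a b => a ≤ b) → ∀ (h : s ≠ []), ∀ y ∈ s, y ≤ s.getLast h := by
  induction s with
  | nil => intro _ h; exact absurd rfl h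
  | cons x t ih =>
    intro hpw h y hy
    rw [List.pairwise_cons] at hpw
    obtain ⟨hx, hpt⟩ := hpw
    cases t with
    | nil =>
      simp at hy
      simp [hy]
    | cons z t' =>
      rw [List.getLast_cons (List.cons_ne_nil z t')]
      rcases List.mem_cons.mp hy with h1 | h1
      · subst h1
        exact hx _ (List.getLast_mem _)
      · exact ih hpt (List.cons_ne_nil z t') y h1

theorem pv_a_true_iff (perm : List Int) (n k : Int) (hk : (perm.length : Int) = k) :
    ((if ((PySem.Set.ofList perm).length : Int) ≠ k then false
      else if perm.any (fun x => decide (x < 0) || decide (x ≥ n)) then false else true) = true)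
    ↔ (perm.Nodup ∧ ∀ x ∈ perm, 0 ≤ x ∧ x < n) := by
  have hni : ((PySem.Set.ofList perm).length : Int) = k ↔ perm.Nodup := by
    rw [← hk, Nat.cast_inj]
    exact pv_ofList_length_eq_iff perm
  split_ifs with h1 h2
  · simp only [false_iff]
    rintro ⟨hnd, _⟩
    exact h1 (hni.mpr hnd)
  · simp only [false_iff]
    rintro ⟨_, hq⟩
    rcases List.any_eq_true.mp h2 with ⟨x, hx, hcond⟩
    simp only [Bool.or_eq_true, decide_eq_true_eq] at hcond
    have := hq x hx
    omega
  · simp only [true_iff]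
    refine ⟨hni.mp (not_not.mp h1), ?_⟩
    intro x hx
    have h3 : ¬((decide (x < 0) || decide (x ≥ n)) = true) :=
      fun h => h2 (List.any_eq_true.mpr ⟨x, hx, h⟩)
    simp only [Bool.or_eq_true, decide_eq_true_eq, not_or] at h3
    omega

theorem pv_alt_true_iff (perm : List Int) (n : Int) (s : List Int)
    (hperm : s.Perm perm) (hpw : s.Pairwise (fun a b => a ≤ b)) :
    ((if (s.zip s.tail).any (fun p => p.1 == p.2) then false
      else match s with
      | [] => true
      | x :: t => decide (0 ≤ x) && decide ((x :: t).getLast (List.cons_ne_nil x t) < n)) = true)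
    ↔ (perm.Nodup ∧ ∀ x ∈ perm, 0 ≤ x ∧ x < n) := by
  have hzn := pv_zip_nodup s hpw
  split_ifs with hzip
  · simp only [false_iff]
    rintro ⟨hnd, _⟩
    have hf : (s.zip s.tail).any (fun p => p.1 == p.2) = false :=
      hzn.mpr (hperm.nodup_iff.mpr hnd)
    rw [hf] at hzip
    exact absurd hzip (by simp)
  · rw [Bool.not_eq_true] at hzip
    have hnd : perm.Nodup := hperm.nodup_iff.mp (hzn.mp hzip)
    cases s with
    | nil =>
      have : perm = [] := hperm.symm.eq_nil
      subst this
      simp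
    | cons x t =>
      simp only [Bool.and_eq_true, decide_eq_true_eq]
      constructor
      · rintro ⟨h0, hl⟩
        refine ⟨hnd, ?_⟩
        intro y hy
        have hys : y ∈ x :: t := hperm.mem_iff.mpr hy
        have h1 : x ≤ y := by
          rcases List.mem_cons.mp hys with h | h
          · exact h ▸ le_refl x
          · exact (List.pairwise_cons.mp hpw).1 y h
        have h2 : y ≤ (x :: t).getLast (List.cons_ne_nil x t) :=
          pv_le_getLast (x :: t) hpw (List.cons_ne_nil x t) y hys
        omega
      · rintro ⟨_, hq⟩
        have hx : x ∈ perm := hperm.mem_iff.mp List.mem_cons_self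
        have hlm : (x :: t).getLast (List.cons_ne_nil x t) ∈ perm :=
          hperm.mem_iff.mp (List.getLast_mem _)
        exact ⟨(hq x hx).1, (hq _ hlm).2⟩

theorem pv_bool_eq {a b : Bool} (h : (a = true) ↔ (b = true)) : a = b := by
  cases a <;> cases b <;> simp_all

-- ===== VERDICT (by name: the statement is the Claim_ definition above) =====
theorem validate_k_permutation_spec : Claim_equal_validate_k_permutation := by
  intro perm n k _
  unfold Spec_validate_k_permutation validate_k_permutation validate_k_permutation_alt
  by_cases hlk : (perm.length : Int) ≠ k
  · rw [if_pos hlk, if_pos hlk]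
  · rw [if_neg hlk, if_neg hlk]
    have hk : (perm.length : Int) = k := not_not.mp hlk
    have hA := pv_a_true_iff perm n k hk
    have hB := pv_alt_true_iff perm n (PySem.List.sorted perm (fun x => x) false)
      (PySem.List.sorted_perm perm (fun x => x) false)
      (PySem.List.sorted_pairwise perm (fun x => x))
    exact pv_bool_eq (hA.trans hB.symm)
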